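-- pv_equiv track=rewrite | github.com/nmthuan1405/live-score | client.py | caculateHT
-- ===== SOURCE A (Python) =====
-- def caculateHT(details):
--     ht_start, ht_len, ot = 45, 0, 0
--     for detail in details:
--         if detail[3] == 4:
--             ht_start = detail[2]
--             ht_len = detail[4]
--         if detail[3] == 5:
--             ot = detail[4]
--
--     return ht_start, ht_len, ot
-- ===== SOURCE B (Python) =====
-- def caculateHT(details):
--     fours = [d for d in details if d[3] == 4]
--     fives = [d for d in details if d[3] == 5]
--     ht_start, ht_len = (fours[-1][2], fours[-1][4]) if fours else (45, 0)
--     ot = fives[-1][4] if fives else 0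
--     return ht_start, ht_len, ot
-- ===== Notes on version B (the rewrite author's own statement) =====
-- stated objective: simpler
-- what changed: Replaces the single accumulating loop with two filter passes (events of kind 4 and kind 5) and tail indexing of each filtered list, making the last-match-wins semantics explicit.
import Mathlib
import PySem

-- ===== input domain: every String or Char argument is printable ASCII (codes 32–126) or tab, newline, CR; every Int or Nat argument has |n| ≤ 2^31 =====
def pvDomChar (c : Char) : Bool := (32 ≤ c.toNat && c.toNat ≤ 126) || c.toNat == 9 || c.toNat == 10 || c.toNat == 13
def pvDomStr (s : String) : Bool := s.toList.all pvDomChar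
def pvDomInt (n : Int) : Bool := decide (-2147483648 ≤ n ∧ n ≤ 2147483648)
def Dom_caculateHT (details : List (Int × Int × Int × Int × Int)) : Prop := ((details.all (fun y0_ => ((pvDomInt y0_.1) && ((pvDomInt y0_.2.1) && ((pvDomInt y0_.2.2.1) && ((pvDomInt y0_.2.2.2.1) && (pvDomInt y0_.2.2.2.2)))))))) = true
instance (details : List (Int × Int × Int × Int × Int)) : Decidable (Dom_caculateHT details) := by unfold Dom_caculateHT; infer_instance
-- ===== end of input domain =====

-- B replaces A's single accumulating loop by two filter passes plus last-element indexing (simpler decomposition; return value only).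


-- ===== PORT A =====
def caculateHT (details : List (Int × Int × Int × Int × Int)) : Int × Int × Int :=
  details.foldl
    (fun st d =>
      let st1 := if d.2.2.2.1 = 4 then (d.2.2.1, d.2.2.2.2, st.2.2) else st
      if d.2.2.2.1 = 5 then (st1.1, st1.2.1, d.2.2.2.2) else st1)
    (45, 0, 0)

-- ===== PORT B =====
def caculateHT_alt (details : List (Int × Int × Int × Int × Int)) : Int × Int × Int :=
  let fours := details.filter (fun d => d.2.2.2.1 == 4)
  let fives := details.filter (fun d => d.2.2.2.1 == 5)
  let ht : Int × Int :=
    match fours.getLast? with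
    | some d => (d.2.2.1, d.2.2.2.2)
    | none => (45, 0)
  let ot : Int :=
    match fives.getLast? with
    | some d => d.2.2.2.2
    | none => 0
  (ht.1, ht.2, ot)

-- ===== PRECONDITION & SPEC =====
def Spec_caculateHT (details : List (Int × Int × Int × Int × Int)) (out : Int × Int × Int) : Prop := out = caculateHT_alt details
instance (details : List (Int × Int × Int × Int × Int)) (out : Int × Int × Int) : Decidable (Spec_caculateHT details out) := by unfold Spec_caculateHT; infer_instance

-- ===== CLAIM (what is proved, stated in full; the proofs are below) =====
def Claim_equal_caculateHT : Prop := ∀ (details : List (Int × Int × Int × Int × Int)), Dom_caculateHT details → Spec_caculateHT details (caculateHT details)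

-- ===== LEMMAS AND PROOFS =====

theorem caculateHT_eq (details : List (Int × Int × Int × Int × Int)) :
    caculateHT details = caculateHT_alt details := by
  induction details using List.reverseRecOn with
  | nil => rfl
  | append_singleton xs x ih =>
      simp only [caculateHT, List.foldl_append, List.foldl_cons, List.foldl_nil] at *
      simp only [caculateHT_alt, List.filter_append, List.filter_cons, List.filter_nil] at *
      by_cases h4 : x.2.2.2.1 = 4 <;> by_cases h5 : x.2.2.2.1 = 5 <;>
        simp_all [List.getLast?_append]

-- ===== VERDICT (by name: the statement is the Claim_ definition above) =====
theorem caculateHT_spec : Claim_equal_caculateHT := by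
  intro details _
  exact caculateHT_eq details
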